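-- pv_equiv track=rewrite | github.com/colopop/FooBar | level 3/q1.py | answer
-- ===== SOURCE A (Python) =====
-- def answer(start, length):
--
--     #first a function that gets the checksum of the sequence 0..x
--     def getChecksum(first, last):
--
--         def helper(x):
--             if x%4 == 0:
--                 return x
--             if x%4 == 1:
--                 return 1
--             if x%4 == 2:
--                 return x+1
--             if x%4 == 3:
--                 return 0
--
--         return helper(last)^helper(first-1)
--
--     #now we just xor the checksums of the selected minions row-by-row. we can do this because xor is associative.
--     #this function will end up being O(length) -- or O(sqrt(highest minion #)).
--     ans = 0
--     for i in range(length):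
--         ans ^= getChecksum(start + i*length, start + (i+1)*(length-1))
--
--     return ans
-- ===== SOURCE B (Python) =====
-- def answer(start, length):
--     # Parity argument: bit k (k>=1) of the XOR of a half-open range [a, b+1)
--     # is the parity of (n mod 2) * bit_k(n) over its two boundary points n,
--     # and bit 0 is the parity of bit_1(n) over them.  So it suffices to XOR
--     # the ODD boundary points raw into x, and track in c the parity of
--     # (p // 2) % 2 over ALL boundary points; bit 0 of x is then replaced by c.
--     x = 0
--     c = 0
--     for i in range(length):
--         for p in (start + i * length, start + (i + 1) * (length - 1) + 1):
--             if p % 2 == 1: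
--                 x ^= p
--             c ^= (p // 2) % 2
--     return x - x % 2 + c
-- ===== Notes on version B (the rewrite author's own statement) =====
-- stated objective: alternative
-- what changed: Replaces A's per-row mod-4 prefix-XOR checksum table with a bit-parity argument over the 2*length range boundary points: XOR the odd boundary points raw into one accumulator and track the parity of bit 1 over all boundary points separately, then splice that parity in as bit 0 of the result.
import Mathlib
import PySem

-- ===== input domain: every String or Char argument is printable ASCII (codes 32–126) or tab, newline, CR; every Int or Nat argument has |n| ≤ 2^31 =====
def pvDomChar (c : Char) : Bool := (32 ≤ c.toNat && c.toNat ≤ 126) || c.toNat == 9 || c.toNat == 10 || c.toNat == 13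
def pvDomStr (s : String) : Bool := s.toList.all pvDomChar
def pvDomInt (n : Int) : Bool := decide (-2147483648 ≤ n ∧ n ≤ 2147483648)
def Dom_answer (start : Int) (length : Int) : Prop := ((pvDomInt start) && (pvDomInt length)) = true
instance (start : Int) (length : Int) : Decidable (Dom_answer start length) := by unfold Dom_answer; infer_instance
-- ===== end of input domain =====

-- B replaces A's per-row mod-4 checksum table by a boundary-point parity argument:
-- XOR the odd boundary points raw, track bit-1 parity separately, splice it in as bit 0.

-- ===== PORT A =====
-- Python's inner `helper(x)`: x % 4 is always in {0,1,2,3}, so the final case is x % 4 == 3.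
def pvHelper (x : Int) : Int :=
  if PySem.Int.mod x 4 = 0 then x
  else if PySem.Int.mod x 4 = 1 then 1
  else if PySem.Int.mod x 4 = 2 then x + 1
  else 0

def pvGetChecksum (first last : Int) : Int :=
  PySem.Int.bxor (pvHelper last) (pvHelper (first - 1))

def answer (start : Int) (length : Int) : Int :=
  (PySem.List.pyRange 0 length 1).foldl
    (fun ans i => PySem.Int.bxor ans
      (pvGetChecksum (start + i * length) (start + (i + 1) * (length - 1)))) 0

-- ===== PORT B =====
-- one boundary point p updates the pair (x, c): x collects odd p's, c the parity of (p//2)%2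
def pvStep (st : Int × Int) (p : Int) : Int × Int :=
  (if PySem.Int.mod p 2 = 1 then PySem.Int.bxor st.1 p else st.1,
   PySem.Int.bxor st.2 (PySem.Int.mod (PySem.Int.floordiv p 2) 2))

def answer_alt (start : Int) (length : Int) : Int :=
  let st := (PySem.List.pyRange 0 length 1).foldl
    (fun st i =>
      pvStep (pvStep st (start + i * length)) (start + (i + 1) * (length - 1) + 1)) (0, 0)
  st.1 - PySem.Int.mod st.1 2 + st.2

-- ===== PRECONDITION & SPEC =====
def Spec_answer (start : Int) (length : Int) (out : Int) : Prop := out = answer_alt start length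
instance (start : Int) (length : Int) (out : Int) : Decidable (Spec_answer start length out) := by unfold Spec_answer; infer_instance

-- ===== CLAIM (what is proved, stated in full; the proofs are below) =====
def Claim_equal_answer : Prop := ∀ (start : Int) (length : Int), Dom_answer start length → Spec_answer start length (answer start length)

-- ===== LEMMAS AND PROOFS =====

theorem bxor_pn (m n : Nat) : PySem.Int.bxor (↑m) (Int.negSucc n) = Int.negSucc (m ^^^ n) := by
  simp only [PySem.Int.bxor, Int.negSucc_eq]
  split_ifs with h1 h2 <;> try omega
  have e : (- -((n : Int) + 1) - 1).toNat = n := by omega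
  rw [Int.toNat_natCast, e]; omega

theorem bxor_np (m n : Nat) : PySem.Int.bxor (Int.negSucc m) (↑n) = Int.negSucc (m ^^^ n) := by
  simp only [PySem.Int.bxor, Int.negSucc_eq]
  split_ifs with h1 h2 <;> try omega
  have e : (- -((m : Int) + 1) - 1).toNat = m := by omega
  rw [Int.toNat_natCast, e]; omega

theorem bxor_nn (m n : Nat) : PySem.Int.bxor (Int.negSucc m) (Int.negSucc n) = ↑(m ^^^ n) := by
  simp only [PySem.Int.bxor, Int.negSucc_eq]
  split_ifs with h1 h2 <;> try omega
  have e1 : (- -((m : Int) + 1) - 1).toNat = m := by omega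
  have e2 : (- -((n : Int) + 1) - 1).toNat = n := by omega
  rw [e1, e2]

theorem bxor_assoc (a b c : Int) :
    PySem.Int.bxor (PySem.Int.bxor a b) c = PySem.Int.bxor a (PySem.Int.bxor b c) := by
  cases a <;> cases b <;> cases c <;>
    simp only [Int.ofNat_eq_natCast, PySem.Int.bxor_natCast, bxor_pn, bxor_np, bxor_nn,
      Nat.xor_assoc]

theorem natXorOne (k : Nat) : (2 * k) ^^^ 1 = 2 * k + 1 := by
  apply Nat.eq_of_testBit_eq
  intro i
  cases i with
  | zero => simp [Nat.testBit_zero]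
  | succ i => simp [Nat.testBit_succ]

theorem bxor_one_of_even (e : Int) (he : e % 2 = 0) : PySem.Int.bxor e 1 = e + 1 := by
  cases e with
  | ofNat m =>
    rw [Int.ofNat_eq_natCast] at he
    have : m % 2 = 0 := by omega
    obtain ⟨k, rfl⟩ : ∃ k, m = 2 * k := ⟨m / 2, by omega⟩
    have h1 : ((1 : Int)) = ((1 : Nat) : Int) := rfl
    rw [Int.ofNat_eq_natCast, h1, PySem.Int.bxor_natCast, natXorOne]
    push_cast; ring
  | negSucc m =>
    have hm : m % 2 = 1 := by simp [Int.negSucc_eq] at he; omega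
    obtain ⟨k, rfl⟩ : ∃ k, m = 2 * k + 1 := ⟨m / 2, by omega⟩
    have h1 : ((1 : Int)) = ((1 : Nat) : Int) := rfl
    rw [h1, bxor_np]
    have h2 : (2 * k + 1) ^^^ 1 = 2 * k := by
      calc (2 * k + 1) ^^^ 1 = ((2 * k) ^^^ 1) ^^^ 1 := by rw [natXorOne]
        _ = (2 * k) ^^^ (1 ^^^ 1) := Nat.xor_assoc _ _ _
        _ = 2 * k := by simp
    rw [h2]
    simp [Int.negSucc_eq]

theorem natXorParity (m n : Nat) : (m ^^^ n) % 2 = (m + n) % 2 := by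
  have h : (m ^^^ n) &&& 1 = (m &&& 1) ^^^ (n &&& 1) := Nat.and_xor_distrib_right
  rw [Nat.and_one_is_mod, Nat.and_one_is_mod, Nat.and_one_is_mod] at h
  have hm : m % 2 = 0 ∨ m % 2 = 1 := by omega
  have hn : n % 2 = 0 ∨ n % 2 = 1 := by omega
  rcases hm with h1 | h1 <;> rcases hn with h2 | h2 <;>
    rw [h, h1, h2] <;> simp <;> omega

theorem bxor_parity (a b : Int) : PySem.Int.bxor a b % 2 = (a + b) % 2 := by
  cases a with
  | ofNat m =>
    cases b with
    | ofNat n =>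
      rw [Int.ofNat_eq_natCast, Int.ofNat_eq_natCast, PySem.Int.bxor_natCast]
      have := natXorParity m n; omega
    | negSucc n =>
      rw [Int.ofNat_eq_natCast, bxor_pn]
      have := natXorParity m n
      simp only [Int.negSucc_eq]; omega
  | negSucc m =>
    cases b with
    | ofNat n =>
      rw [Int.ofNat_eq_natCast, bxor_np]
      have := natXorParity m n
      simp only [Int.negSucc_eq]; omega
    | negSucc n =>
      rw [bxor_nn]
      have := natXorParity m n
      simp only [Int.negSucc_eq]; omega

-- XOR distributes over an even part plus a 0/1 bit
theorem bxor_evenbit (e f c d : Int) (he : e % 2 = 0) (hf : f % 2 = 0)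
    (hc : c = 0 ∨ c = 1) (hd : d = 0 ∨ d = 1) :
    PySem.Int.bxor (e + c) (f + d) = PySem.Int.bxor e f + (c + d) % 2 := by
  have hev : PySem.Int.bxor e f % 2 = 0 := by have := bxor_parity e f; omega
  rcases hc with rfl | rfl <;> rcases hd with rfl | rfl
  · norm_num
  · rw [add_zero, ← bxor_one_of_even f hf, ← bxor_assoc, bxor_one_of_even _ hev]; norm_num
  · rw [add_zero, ← bxor_one_of_even e he, PySem.Int.bxor_comm (PySem.Int.bxor e 1) f,
      ← bxor_assoc, PySem.Int.bxor_comm f e, bxor_one_of_even _ hev]; norm_num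
  · rw [← bxor_one_of_even e he, ← bxor_one_of_even f hf, bxor_assoc,
      PySem.Int.bxor_comm 1 (PySem.Int.bxor f 1), bxor_assoc, PySem.Int.bxor_self,
      PySem.Int.bxor_zero]; norm_num

theorem modTwo (x : Int) : PySem.Int.mod x 2 = x % 2 := by
  simp [PySem.Int.mod, Int.fmod_eq_emod]

theorem modFour (x : Int) : PySem.Int.mod x 4 = x % 4 := by
  simp [PySem.Int.mod, Int.fmod_eq_emod]

theorem fdivTwo (x : Int) : PySem.Int.floordiv x 2 = x / 2 := by
  simp [PySem.Int.floordiv, Int.fdiv_eq_ediv]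

-- one boundary point p: B's state update corresponds to XORing A's helper(p-1) into the combined value
theorem bxor_bit (c : Int) (hc : c = 0 ∨ c = 1) : PySem.Int.bxor c 1 = (c + 1) % 2 := by
  rcases hc with rfl | rfl <;> decide

theorem stepW (x c p : Int) (hc : c = 0 ∨ c = 1) :
    (pvStep (x, c) p).1 - (pvStep (x, c) p).1 % 2 + (pvStep (x, c) p).2
      = PySem.Int.bxor (x - x % 2 + c) (pvHelper (p - 1))
    ∧ ((pvStep (x, c) p).2 = 0 ∨ (pvStep (x, c) p).2 = 1) := by
  have hxe : (x - x % 2) % 2 = 0 := by omega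
  have hxs : x % 2 = 0 ∨ x % 2 = 1 := by omega
  have hx : x = (x - x % 2) + x % 2 := by ring
  have h4 : p % 4 = 0 ∨ p % 4 = 1 ∨ p % 4 = 2 ∨ p % 4 = 3 := by omega
  simp only [pvStep, modTwo, fdivTwo, pvHelper, modFour]
  rcases h4 with h | h | h | h
  · -- p ≡ 0 (mod 4): nothing enters x, c unchanged; helper(p-1) = 0
    rw [if_neg (by omega : ¬ p % 2 = 1),
      (by omega : p / 2 % 2 = (0 : Int)), PySem.Int.bxor_zero,
      if_neg (by omega : ¬ (p - 1) % 4 = 0), if_neg (by omega : ¬ (p - 1) % 4 = 1),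
      if_neg (by omega : ¬ (p - 1) % 4 = 2), PySem.Int.bxor_zero]
    exact ⟨rfl, hc⟩
  · -- p ≡ 1 (mod 4): x gets p, c unchanged; helper(p-1) = p - 1
    rw [if_pos (by omega : p % 2 = 1),
      (by omega : p / 2 % 2 = (0 : Int)), PySem.Int.bxor_zero,
      if_pos (by omega : (p - 1) % 4 = 0)]
    refine ⟨?_, hc⟩
    have hb : PySem.Int.bxor x p
        = PySem.Int.bxor (x - x % 2) (p - 1) + (x % 2 + 1) % 2 := by
      conv_lhs => rw [hx, (by ring : p = (p - 1) + 1)]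
      exact bxor_evenbit _ _ _ _ hxe (by omega) hxs (by omega)
    have hev : PySem.Int.bxor (x - x % 2) (p - 1) % 2 = 0 := by
      have := bxor_parity (x - x % 2) (p - 1); omega
    have hr := bxor_evenbit (x - x % 2) (p - 1) c 0 hxe (by omega) hc (Or.inl rfl)
    rw [add_zero] at hr
    rw [hb, hr]
    omega
  · -- p ≡ 2 (mod 4): x unchanged, c flips; helper(p-1) = 1
    rw [if_neg (by omega : ¬ p % 2 = 1),
      (by omega : p / 2 % 2 = (1 : Int)),
      if_neg (by omega : ¬ (p - 1) % 4 = 0), if_pos (by omega : (p - 1) % 4 = 1)]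
    have hr := bxor_evenbit (x - x % 2) 0 c 1 hxe (by norm_num) hc (Or.inr rfl)
    rw [PySem.Int.bxor_zero, zero_add] at hr
    refine ⟨?_, by rw [bxor_bit c hc]; omega⟩
    rw [hr, bxor_bit c hc]
  · -- p ≡ 3 (mod 4): x gets p, c flips; helper(p-1) = p
    rw [if_pos (by omega : p % 2 = 1),
      (by omega : p / 2 % 2 = (1 : Int)),
      if_neg (by omega : ¬ (p - 1) % 4 = 0), if_neg (by omega : ¬ (p - 1) % 4 = 1),
      if_pos (by omega : (p - 1) % 4 = 2), (by ring : p - 1 + 1 = p)]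
    refine ⟨?_, by rw [bxor_bit c hc]; omega⟩
    have hb : PySem.Int.bxor x p
        = PySem.Int.bxor (x - x % 2) (p - 1) + (x % 2 + 1) % 2 := by
      conv_lhs => rw [hx, (by ring : p = (p - 1) + 1)]
      exact bxor_evenbit _ _ _ _ hxe (by omega) hxs (by omega)
    have hev : PySem.Int.bxor (x - x % 2) (p - 1) % 2 = 0 := by
      have := bxor_parity (x - x % 2) (p - 1); omega
    have hr := bxor_evenbit (x - x % 2) (p - 1) c 1 hxe (by omega) hc (Or.inr rfl)
    have hr2 : PySem.Int.bxor (x - x % 2 + c) p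
        = PySem.Int.bxor (x - x % 2) (p - 1) + (c + 1) % 2 := by
      conv_lhs => rw [(by ring : (p : Int) = p - 1 + 1)]
      exact hr
    rw [hb, hr2, bxor_bit c hc]
    omega

-- fold invariant: B's (x, c) state tracks A's accumulator as x - x%2 + c
theorem foldInv (start length : Int) (l : List Int) (x c ans : Int)
    (hc : c = 0 ∨ c = 1) (hu : x - x % 2 + c = ans) :
    (l.foldl (fun st i =>
        pvStep (pvStep st (start + i * length)) (start + (i + 1) * (length - 1) + 1)) (x, c)).1
      - (l.foldl (fun st i =>
        pvStep (pvStep st (start + i * length)) (start + (i + 1) * (length - 1) + 1)) (x, c)).1 % 2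
      + (l.foldl (fun st i =>
        pvStep (pvStep st (start + i * length)) (start + (i + 1) * (length - 1) + 1)) (x, c)).2
    = l.foldl (fun a i => PySem.Int.bxor a
        (pvGetChecksum (start + i * length) (start + (i + 1) * (length - 1)))) ans := by
  induction l generalizing x c ans with
  | nil => simpa using hu
  | cons i t ih =>
    simp only [List.foldl_cons]
    obtain ⟨h1, h1c⟩ := stepW x c (start + i * length) hc
    obtain ⟨h2, h2c⟩ := stepW (pvStep (x, c) (start + i * length)).1
      (pvStep (x, c) (start + i * length)).2 (start + (i + 1) * (length - 1) + 1) h1c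
    refine ih (pvStep (pvStep (x, c) (start + i * length))
        (start + (i + 1) * (length - 1) + 1)).1
      (pvStep (pvStep (x, c) (start + i * length))
        (start + (i + 1) * (length - 1) + 1)).2 _ h2c ?_
    have h2' : (pvStep (pvStep (x, c) (start + i * length))
          (start + (i + 1) * (length - 1) + 1)).1
        - (pvStep (pvStep (x, c) (start + i * length))
          (start + (i + 1) * (length - 1) + 1)).1 % 2
        + (pvStep (pvStep (x, c) (start + i * length))
          (start + (i + 1) * (length - 1) + 1)).2
        = PySem.Int.bxor ((pvStep (x, c) (start + i * length)).1
            - (pvStep (x, c) (start + i * length)).1 % 2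
            + (pvStep (x, c) (start + i * length)).2)
          (pvHelper (start + (i + 1) * (length - 1) + 1 - 1)) := h2
    rw [h2', h1, hu, (by ring : start + (i + 1) * (length - 1) + 1 - 1
      = start + (i + 1) * (length - 1))]
    unfold pvGetChecksum
    rw [bxor_assoc, PySem.Int.bxor_comm (pvHelper (start + i * length - 1)), ← bxor_assoc]

-- ===== VERDICT (by name: the statement is the Claim_ definition above) =====
theorem answer_spec : Claim_equal_answer := by
  intro start length _
  unfold Spec_answer answer answer_alt
  simp only [modTwo]
  exact (foldInv start length (PySem.List.pyRange 0 length 1) 0 0 0 (Or.inl rfl)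
    (by norm_num)).symm
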